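-- pv_equiv track=rewrite | github.com/microsoft/UFO | ufo/automator/app_apis/excel/excelclient.py | get_nth_non_empty_position
-- ===== SOURCE A (Python) =====
-- from typing import Any, Dict, List, Type, Union
--
-- def get_nth_non_empty_position(target_idx: int, empty_cols: List[int]) -> int:
--     """
--     Get the Nth available column index in the sheet, skipping empty columns.
--     :param target_idx: The target index of the non-empty column.
--     :param empty_cols: The list of empty column indexes.
--     :return: The Nth non-empty column index.
--     """
--     col = 1
--     non_empty_count = 0
--     while True:
--         if col not in empty_cols:
--             non_empty_count += 1
--         if non_empty_count == target_idx:
--             return col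
--         col += 1
-- ===== SOURCE B (Python) =====
-- def get_nth_non_empty_position(target_idx, empty_cols):
--     ans = target_idx
--     for e in sorted(set(e for e in empty_cols if e >= 1)):
--         if e <= ans:
--             ans += 1
--         else:
--             break
--     return ans
-- ===== Notes on version B (the rewrite author's own statement) =====
-- stated objective: faster
-- what changed: Instead of scanning columns 1,2,3,... and testing each against the list, B sorts the distinct positive empty columns once and shifts the answer past each empty column it covers (answer starts at target_idx and is bumped for every sorted empty column <= current answer).
-- intended difference: On target_idx = 0 with column 1 listed empty, A's check-after-count accidentally returns 1 (target 0 is matched before any non-empty column is seen); B returns 0 (no shifting applies), the natural value for the degenerate target; all other target_idx <= 0 inputs make A loop forever and lie outside Pre_. — e.g. on get_nth_non_empty_position(0, [1]): A returns 1, B returns 0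
import Mathlib
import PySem

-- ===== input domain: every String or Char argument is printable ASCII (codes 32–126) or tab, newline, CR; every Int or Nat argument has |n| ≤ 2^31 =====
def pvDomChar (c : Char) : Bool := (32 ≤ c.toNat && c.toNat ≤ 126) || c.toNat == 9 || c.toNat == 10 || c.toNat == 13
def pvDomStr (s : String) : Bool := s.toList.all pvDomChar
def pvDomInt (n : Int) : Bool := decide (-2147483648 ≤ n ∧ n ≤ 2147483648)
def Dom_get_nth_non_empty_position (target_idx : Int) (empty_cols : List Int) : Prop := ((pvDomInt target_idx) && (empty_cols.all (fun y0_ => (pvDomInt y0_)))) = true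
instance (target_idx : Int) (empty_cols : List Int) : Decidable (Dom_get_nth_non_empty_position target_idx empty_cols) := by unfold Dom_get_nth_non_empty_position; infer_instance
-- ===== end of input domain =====

-- B replaces A's unbounded column-by-column scan with sort(set(positive empties)) + a single shift pass (measurably faster; asymptotic).


-- ===== PORT A =====
-- A's `while True` loop, made total with a fuel counter that (under Pre_) never runs out;
-- the state (col, non_empty_count) and the branch order are A's.
def pvALoopA (target : Int) (empty_cols : List Int) : Nat → Int → Int → Int
  | 0, col, _ => col  -- fuel exhausted: unreachable for inputs satisfying Pre_
  | fuel + 1, col, cnt =>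
    let cnt' := if col ∈ empty_cols then cnt else cnt + 1
    if cnt' = target then col else pvALoopA target empty_cols fuel (col + 1) cnt'

def get_nth_non_empty_position (target_idx : Int) (empty_cols : List Int) : Int :=
  pvALoopA target_idx empty_cols (target_idx.toNat + empty_cols.length + 1) 1 0

-- ===== PORT B =====
def pvBLoop : List Int → Int → Int
  | [], ans => ans
  | e :: rest, ans => if e ≤ ans then pvBLoop rest (ans + 1) else ans

def get_nth_non_empty_position_alt (target_idx : Int) (empty_cols : List Int) : Int :=
  pvBLoop (PySem.List.sorted (PySem.Set.ofList (empty_cols.filter (fun e => 1 ≤ e))) (fun x => x) false)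
    target_idx

-- ===== PRECONDITION & SPEC =====
-- Pre_ excludes exactly the inputs on which A's while-loop never returns: every target_idx < 0,
-- and target_idx = 0 unless column 1 is empty (that last returning corner stays inside, as D_).
def Pre_get_nth_non_empty_position (target_idx : Int) (empty_cols : List Int) : Prop :=
  1 ≤ target_idx ∨ (target_idx = 0 ∧ (1 : Int) ∈ empty_cols)
instance (target_idx : Int) (empty_cols : List Int) : Decidable (Pre_get_nth_non_empty_position target_idx empty_cols) := by unfold Pre_get_nth_non_empty_position; infer_instance
def pvWitness_get_nth_non_empty_position : Int × List Int := (3, [1, 5])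

-- On target_idx = 0 with column 1 listed empty, A's check-after-count accidentally returns 1
-- (target 0 is matched before any non-empty column is seen); B returns 0, the natural value
-- for the degenerate target.
def D_get_nth_non_empty_position (target_idx : Int) (empty_cols : List Int) : Prop :=
  target_idx = 0
instance (target_idx : Int) (empty_cols : List Int) : Decidable (D_get_nth_non_empty_position target_idx empty_cols) := by unfold D_get_nth_non_empty_position; infer_instance

def Spec_get_nth_non_empty_position (target_idx : Int) (empty_cols : List Int) (out : Int) : Prop := ¬ D_get_nth_non_empty_position target_idx empty_cols → out = get_nth_non_empty_position_alt target_idx empty_cols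
instance (target_idx : Int) (empty_cols : List Int) (out : Int) : Decidable (Spec_get_nth_non_empty_position target_idx empty_cols out) := by unfold Spec_get_nth_non_empty_position; infer_instance

def pvDiffWitness_get_nth_non_empty_position : Int × List Int := (0, [1])
def pvDiffWitnessOut_get_nth_non_empty_position : Int × Int := (1, 0)

-- ===== CLAIM (what is proved, stated in full; the proofs are below) =====
def Claim_unchanged_get_nth_non_empty_position : Prop := ∀ (target_idx : Int) (empty_cols : List Int), Dom_get_nth_non_empty_position target_idx empty_cols → Pre_get_nth_non_empty_position target_idx empty_cols → Spec_get_nth_non_empty_position target_idx empty_cols (get_nth_non_empty_position target_idx empty_cols)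
def Claim_changed_get_nth_non_empty_position : Prop := Dom_get_nth_non_empty_position (pvDiffWitness_get_nth_non_empty_position.1) (pvDiffWitness_get_nth_non_empty_position.2) ∧ Pre_get_nth_non_empty_position (pvDiffWitness_get_nth_non_empty_position.1) (pvDiffWitness_get_nth_non_empty_position.2) ∧ D_get_nth_non_empty_position (pvDiffWitness_get_nth_non_empty_position.1) (pvDiffWitness_get_nth_non_empty_position.2) ∧ get_nth_non_empty_position (pvDiffWitness_get_nth_non_empty_position.1) (pvDiffWitness_get_nth_non_empty_position.2) = pvDiffWitnessOut_get_nth_non_empty_position.1 ∧ get_nth_non_empty_position_alt (pvDiffWitness_get_nth_non_empty_position.1) (pvDiffWitness_get_nth_non_empty_position.2) = pvDiffWitnessOut_get_nth_non_empty_position.2 ∧ pvDiffWitnessOut_get_nth_non_empty_position.1 ≠ pvDiffWitnessOut_get_nth_non_empty_position.2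
def Claim_exact_get_nth_non_empty_position : Prop := ∀ (target_idx : Int) (empty_cols : List Int), Dom_get_nth_non_empty_position target_idx empty_cols → Pre_get_nth_non_empty_position target_idx empty_cols → D_get_nth_non_empty_position target_idx empty_cols → get_nth_non_empty_position target_idx empty_cols ≠ get_nth_non_empty_position_alt target_idx empty_cols

-- ===== LEMMAS AND PROOFS =====

-- cntI S c = number (as Int) of entries of S that are ≤ c
def cntI (S : List Int) (c : Int) : Int := ((S.filter (fun e => e ≤ c)).length : Int)

theorem le_pvBLoop (S : List Int) : ∀ a : Int, a ≤ pvBLoop S a := by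
  induction S with
  | nil => intro a; simp [pvBLoop]
  | cons e rest ih =>
    intro a
    simp only [pvBLoop]
    split
    · have := ih (a + 1); omega
    · omega

-- main characterisation of B's loop on a strictly increasing list
theorem pvBLoop_spec (S : List Int) (hS : S.Pairwise (· < ·)) :
    ∀ a : Int, cntI S (pvBLoop S a) = pvBLoop S a - a ∧ pvBLoop S a ∉ S := by
  induction S with
  | nil => intro a; simp [pvBLoop, cntI]
  | cons e rest ih =>
    intro a
    rcases List.pairwise_cons.mp hS with ⟨h1, hp⟩
    by_cases he : e ≤ a
    · have hr := ih hp (a + 1)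
      have hge := le_pvBLoop rest (a + 1)
      simp only [pvBLoop, if_pos he]
      refine ⟨?_, ?_⟩
      · have heq : e ≤ pvBLoop rest (a + 1) := by omega
        simp only [cntI, List.filter_cons, decide_eq_true_eq, if_pos heq, List.length_cons] at *
        push_cast at *
        omega
      · simp only [List.mem_cons, not_or]
        exact ⟨by omega, hr.2⟩
    · simp only [pvBLoop, if_neg he]
      refine ⟨?_, ?_⟩
      · have hrest : rest.filter (fun x => x ≤ a) = [] := by
          apply List.filter_eq_nil_iff.mpr
          intro x hx
          have := h1 x hx
          simp only [decide_eq_true_eq]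
          omega
        simp [cntI, he, hrest]
      · simp only [List.mem_cons, not_or]
        refine ⟨by omega, fun hx => ?_⟩
        have := h1 a hx; omega

-- counting step: going from c-1 to c adds 1 exactly when c ∈ S (S without duplicates)
theorem cntI_step (S : List Int) (hS : S.Nodup) (c : Int) :
    cntI S c = cntI S (c - 1) + (if c ∈ S then 1 else 0) := by
  induction S with
  | nil => simp [cntI]
  | cons e rest ih =>
    rcases List.nodup_cons.mp hS with ⟨hne, hnd⟩
    have ihr := ih hnd
    simp only [cntI, List.filter_cons, decide_eq_true_eq, List.mem_cons] at ihr ⊢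
    by_cases hce : c = e
    · subst hce
      have h2 : ¬ (c ≤ c - 1) := by omega
      rw [if_pos le_rfl, if_neg h2, if_pos (Or.inl rfl)]
      rw [if_neg hne] at ihr
      simp only [List.length_cons]
      push_cast at *
      omega
    · have hle : (e ≤ c) = (e ≤ c - 1) := propext (by constructor <;> intro <;> omega)
      have hmm : (c = e ∨ c ∈ rest) = (c ∈ rest) := propext (or_iff_right hce)
      simp only [hle, hmm]
      split_ifs at ihr ⊢ <;> simp only [List.length_cons] at * <;> push_cast at * <;> omega

-- monotonicity of c ↦ c - cntI S c for duplicate-free S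
theorem f_mono (S : List Int) (hS : S.Nodup) (c d : Int) (hcd : c ≤ d) :
    c - cntI S c ≤ d - cntI S d := by
  induction d, hcd using Int.le_induction with
  | base => omega
  | succ n hn ih =>
    have hstep := cntI_step S hS (n + 1)
    have h' : n + 1 - 1 = n := by ring
    rw [h'] at hstep
    split_ifs at hstep <;> omega

-- A's loop reaches exactly the column r characterised by B's loop
theorem pvALoopA_spec (S : List Int) (hS : S.Nodup) (ec : List Int)
    (hmem : ∀ x : Int, 1 ≤ x → (x ∈ ec ↔ x ∈ S)) (t r : Int)
    (hr1 : cntI S r = r - t) (hr2 : r ∉ S) :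
    ∀ (fuel : Nat) (col cnt : Int), 1 ≤ col → col ≤ r →
      cnt = (col - 1) - cntI S (col - 1) → r ≤ col - 1 + (fuel : Int) →
      pvALoopA t ec fuel col cnt = r := by
  intro fuel
  induction fuel with
  | zero => intro col cnt h1 h2 h3 h4; omega
  | succ n ih =>
    intro col cnt h1 h2 h3 h4
    have hms : col ∈ ec ↔ col ∈ S := hmem col h1
    have hstep := cntI_step S hS col
    have hcnt' : (if col ∈ ec then cnt else cnt + 1) = col - cntI S col := by
      by_cases hc : col ∈ S
      · rw [if_pos (hms.mpr hc)]; rw [if_pos hc] at hstep; omega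
      · rw [if_neg (fun h => hc (hms.mp h))]; rw [if_neg hc] at hstep; omega
    simp only [pvALoopA, hcnt']
    by_cases heq : col - cntI S col = t
    · rw [if_pos heq]
      -- col = r: otherwise col ≤ r - 1 and monotonicity gives col - cntI S col ≤ t - 1
      by_contra hne
      have hlt : col ≤ r - 1 := by omega
      have hm := f_mono S hS col (r - 1) hlt
      have hr1' := cntI_step S hS r
      rw [if_neg hr2] at hr1'
      omega
    · rw [if_neg heq]
      have hcol : col < r := by
        by_contra h
        have : col = r := by omega
        subst this
        omega
      exact ih (col + 1) (col - cntI S col) (by omega) (by omega) (by ring_nf) (by push_cast at h4 ⊢; omega)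

theorem pvBLoop_const (S : List Int) (a : Int) (h : ∀ e ∈ S, ¬ e ≤ a) :
    pvBLoop S a = a := by
  cases S with
  | nil => rfl
  | cons e rest =>
    simp only [pvBLoop, if_neg (h e (List.mem_cons_self ..))]

-- length of the dedup kept by Set.ofList never exceeds the source length
theorem len_ofList_le (xs : List Int) : (PySem.Set.ofList xs).length ≤ xs.length := by
  have key : ∀ (ys : List Int) (s : List Int),
      (ys.foldl PySem.Set.add s).length ≤ s.length + ys.length := by
    intro ys
    induction ys with
    | nil => intro s; simp
    | cons y t ih =>
      intro s
      have := ih (PySem.Set.add s y)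
      have hadd : (PySem.Set.add s y).length ≤ s.length + 1 := by
        simp only [PySem.Set.add]
        split <;> simp
      simp only [List.foldl_cons, List.length_cons]
      omega
  have := key xs []
  rw [PySem.Set.ofList_eq_foldl]
  simpa using this

theorem main_equiv (t : Int) (ec : List Int) (ht : 1 ≤ t) :
    get_nth_non_empty_position t ec = get_nth_non_empty_position_alt t ec := by
  set S := PySem.List.sorted (PySem.Set.ofList (ec.filter (fun e => 1 ≤ e))) (fun x => x) false with hSdef
  have hpair : S.Pairwise (· < ·) := by
    rw [hSdef]; exact PySem.List.sorted_ofList_pairwise_lt _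
  have hnd : S.Nodup := hpair.imp (fun h => ne_of_lt h)
  have hmemS : ∀ x : Int, x ∈ S ↔ (x ∈ ec ∧ 1 ≤ x) := by
    intro x
    rw [hSdef, PySem.List.mem_sorted, PySem.Set.mem_ofList, List.mem_filter]
    simp
  set r := pvBLoop S t with hrdef
  have hB := pvBLoop_spec S hpair t
  have htr : t ≤ r := le_pvBLoop S t
  have hr1 : cntI S r = r - t := hB.1
  have hr2 : r ∉ S := hB.2
  have hmem : ∀ x : Int, 1 ≤ x → (x ∈ ec ↔ x ∈ S) := by
    intro x hx
    rw [hmemS]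
    exact ⟨fun h => ⟨h, hx⟩, fun h => h.1⟩
  have halt : get_nth_non_empty_position_alt t ec = r := rfl
  rw [halt]
  -- fuel accounting: r ≤ t + |ec| + 1
  have hSlen : (S.length : Int) ≤ (ec.length : Int) := by
    have h1 : S.length = (PySem.Set.ofList (ec.filter (fun e => 1 ≤ e))).length :=
      PySem.List.length_sorted ..
    have h2 := len_ofList_le (ec.filter (fun e => 1 ≤ e))
    have h3 := List.length_filter_le (fun e => decide (1 ≤ e)) ec
    rw [h1]; exact_mod_cast le_trans h2 h3
  have hcntlen : cntI S r ≤ (S.length : Int) := by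
    have := List.length_filter_le (fun e => decide (e ≤ r)) S
    simpa [cntI] using Int.ofNat_le.mpr this
  have hcnt0 : cntI S 0 = 0 := by
    have : S.filter (fun e => e ≤ (0 : Int)) = [] := by
      apply List.filter_eq_nil_iff.mpr
      intro x hx
      have := (hmemS x).mp hx
      simp only [decide_eq_true_eq]
      omega
    simp [cntI, this]
  have htnat : ((t.toNat : Int)) = t := Int.toNat_of_nonneg (by omega)
  apply pvALoopA_spec S hnd ec hmem t r hr1 hr2 (t.toNat + ec.length + 1) 1 0
    (by omega) (by omega) (by simp [hcnt0]) (by push_cast; omega)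

-- ===== VERDICT (by name: the statement is the Claim_ definition above) =====
theorem get_nth_non_empty_position_spec : Claim_unchanged_get_nth_non_empty_position := by
  intro t ec _ hpre hD
  have ht : 1 ≤ t := by
    rcases hpre with h | ⟨h, _⟩
    · exact h
    · exact absurd h hD
  exact main_equiv t ec ht

theorem get_nth_non_empty_position_changed : Claim_changed_get_nth_non_empty_position := by
  unfold Claim_changed_get_nth_non_empty_position; decide

theorem get_nth_non_empty_position_tight : Claim_exact_get_nth_non_empty_position := by
  intro t ec _ hpre hD
  unfold D_get_nth_non_empty_position at hD
  subst hD
  have h1 : (1 : Int) ∈ ec := by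
    rcases hpre with h | ⟨_, h⟩
    · omega
    · exact h
  have hA : get_nth_non_empty_position 0 ec = 1 := by
    unfold get_nth_non_empty_position
    simp only [Int.toNat_zero, Nat.zero_add, pvALoopA, if_pos h1]
    norm_num
  have hB : get_nth_non_empty_position_alt 0 ec = 0 := by
    unfold get_nth_non_empty_position_alt
    apply pvBLoop_const
    intro e he
    have := (PySem.Set.mem_ofList _ _).mp ((PySem.List.mem_sorted ..).mp he)
    rw [List.mem_filter] at this
    have := this.2
    simp only [decide_eq_true_eq] at this
    omega
  rw [hA, hB]
  decide
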